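-- pv_equiv track=rewrite | github.com/DAEUN9/TIL | ifif/python/S1_2502.py | solution
-- ===== SOURCE A (Python) =====
-- def solution(D, K):
--     for j in range(1, K+1):
--         for k in range(1, K+1):
--             dp = [j, k]
--             for i in range(D-2):
--                 dp.append(dp[-2] + dp[-1])
--             if dp[-1] == K:
--                 return [j, k]
-- ===== SOURCE B (Python) =====
-- def solution(D, K):
--     # Last element of the dp sequence [j, k, j+k, ...] at length D is a*j + b*k,
--     # where (a, b) are the Fibonacci coefficients below.  Compute them once,
--     # then scan j alone: for each j the matching k is forced, k = (K - a*j) / b.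
--     if K < 1:
--         return None
--     a, b = 0, 1
--     for _ in range(D - 2):
--         a, b = b, a + b
--     for j in range(1, K + 1):
--         r = K - a * j
--         if r >= b and r % b == 0:
--             return [j, r // b]
--     return None
-- ===== Notes on version B (the rewrite author's own statement) =====
-- stated objective: faster
-- what changed: B precomputes the Fibonacci coefficients (a,b) of the D-th term once and scans j alone, computing the unique matching k arithmetically as (K-a*j)/b, instead of rebuilding the whole dp sequence for every (j,k) pair in a nested scan.
import Mathlib
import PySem

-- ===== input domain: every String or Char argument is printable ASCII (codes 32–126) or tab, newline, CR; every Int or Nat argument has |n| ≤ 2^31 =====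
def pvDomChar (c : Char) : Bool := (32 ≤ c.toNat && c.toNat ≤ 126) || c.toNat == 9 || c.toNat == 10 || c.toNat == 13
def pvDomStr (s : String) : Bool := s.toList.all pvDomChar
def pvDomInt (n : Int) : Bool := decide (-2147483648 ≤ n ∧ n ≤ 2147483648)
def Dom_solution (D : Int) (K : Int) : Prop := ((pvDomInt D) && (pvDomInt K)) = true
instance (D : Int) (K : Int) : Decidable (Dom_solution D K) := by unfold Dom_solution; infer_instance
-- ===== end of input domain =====

-- B precomputes the Fibonacci coefficients of the D-th term once and scans j alone,
-- computing the unique matching k arithmetically — asymptotically faster than A's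
-- nested (j,k) scan that rebuilds the dp list for every pair.

-- ===== PORT A =====
-- dp.append(dp[-2] + dp[-1]); dp always has length ≥ 2, so the pyGetD default is never used
def dpStep (dp : List Int) (_i : Int) : List Int :=
  dp ++ [PySem.List.pyGetD dp (-2) 0 + PySem.List.pyGetD dp (-1) 0]

def solution (D : Int) (K : Int) : Option (List Int) :=
  (PySem.List.pyRange 1 (K+1) 1).findSome? fun j =>
    (PySem.List.pyRange 1 (K+1) 1).findSome? fun k =>
      let dp := (PySem.List.pyRange 0 (D-2) 1).foldl dpStep [j, k]
      if PySem.List.pyGetD dp (-1) 0 = K then some [j, k] else none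

-- ===== PORT B =====
def fibStep (p : Int × Int) (_i : Int) : Int × Int := (p.2, p.1 + p.2)

def solution_alt (D : Int) (K : Int) : Option (List Int) :=
  if K < 1 then none
  else
    let ab := (PySem.List.pyRange 0 (D-2) 1).foldl fibStep (0, 1)
    (PySem.List.pyRange 1 (K+1) 1).findSome? fun j =>
      let r := K - ab.1 * j
      if ab.2 ≤ r ∧ PySem.Int.mod r ab.2 = 0 then some [j, PySem.Int.floordiv r ab.2]
      else none

-- ===== PRECONDITION & SPEC =====
def Spec_solution (D : Int) (K : Int) (out : Option (List Int)) : Prop := out = solution_alt D K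
instance (D : Int) (K : Int) (out : Option (List Int)) : Decidable (Spec_solution D K out) := by unfold Spec_solution; infer_instance

-- ===== CLAIM (what is proved, stated in full; the proofs are below) =====
def Claim_equal_solution : Prop := ∀ (D : Int) (K : Int), Dom_solution D K → Spec_solution D K (solution D K)

-- ===== LEMMAS AND PROOFS =====

lemma fib_linear (L : List Int) : ∀ (j k p q p' q' : Int),
    L.foldl fibStep (j*p + k*p', j*q + k*q') =
      (j*(L.foldl fibStep (p,q)).1 + k*(L.foldl fibStep (p',q')).1,
       j*(L.foldl fibStep (p,q)).2 + k*(L.foldl fibStep (p',q')).2) := by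
  induction L with
  | nil => intro j k p q p' q'; simp
  | cons x L ih =>
    intro j k p q p' q'
    simp only [List.foldl_cons, fibStep]
    have h2 : ((j*q + k*q' : Int), (j*p + k*p') + (j*q + k*q')) = ((j*q + k*q' : Int), j*(p+q) + k*(p'+q')) := by
      rw [Prod.mk.injEq]; exact ⟨rfl, by ring⟩
    rw [h2]
    exact ih j k q (p+q) q' (p'+q')

lemma fib_shift (L : List Int) : ∀ p q : Int,
    (L.foldl fibStep (p,q)).2 = (L.foldl fibStep (q, p+q)).1 := by
  induction L with
  | nil => intro p q; rfl
  | cons x L ih =>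
    intro p q
    simp only [List.foldl_cons, fibStep]
    exact ih q (p+q)

lemma fib_eval (L : List Int) (j k : Int) :
    (L.foldl fibStep (j,k)).2 =
      j * (L.foldl fibStep (0,1)).1 + k * (L.foldl fibStep (0,1)).2 := by
  have h := fib_linear L j k 1 0 0 1
  have hs := fib_shift L 1 0
  norm_num at h hs
  rw [h]
  dsimp only
  rw [hs]

lemma fib_pos (L : List Int) : ∀ p q : Int, 0 ≤ p → 1 ≤ q →
    0 ≤ (L.foldl fibStep (p,q)).1 ∧ 1 ≤ (L.foldl fibStep (p,q)).2 := by
  induction L with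
  | nil => intro p q hp hq; exact ⟨hp, hq⟩
  | cons x L ih =>
    intro p q hp hq
    simp only [List.foldl_cons, fibStep]
    exact ih q (p+q) (by omega) (by omega)

lemma dp_fold (L : List Int) : ∀ (pre : List Int) (p q : Int),
    ∃ pre', L.foldl dpStep (pre ++ [p, q]) =
      pre' ++ [(L.foldl fibStep (p,q)).1, (L.foldl fibStep (p,q)).2] := by
  induction L with
  | nil => intro pre p q; exact ⟨pre, rfl⟩
  | cons x L ih =>
    intro pre p q
    have h1 : PySem.List.pyGetD (pre ++ [p, q]) (-1) 0 = q := by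
      have hs : pre ++ [p, q] = (pre ++ [p]) ++ [q] := by simp
      rw [hs, PySem.List.pyGetD_neg_one_append_singleton]
    have h2 : PySem.List.pyGetD (pre ++ [p, q]) (-2) 0 = p := by
      rw [PySem.List.pyGetD_neg_ofNat (pre ++ [p, q]) 2 0 (by omega) (by simp)]
      simp [List.getElem_append_right]
    simp only [List.foldl_cons, dpStep, h1, h2, fibStep]
    have hs : (pre ++ [p, q]) ++ [p + q] = (pre ++ [p]) ++ [q, p+q] := by simp
    rw [hs]
    exact ih (pre ++ [p]) q (p+q)

lemma findSome?_unique {β : Type} (f : Int → Option β) (k0 : Int)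
    (h : ∀ k, k ≠ k0 → f k = none) :
    ∀ L : List Int, L.findSome? f = if k0 ∈ L then f k0 else none := by
  intro L
  induction L with
  | nil => simp
  | cons x L ih =>
    rw [List.findSome?_cons]
    by_cases hx : x = k0
    · subst hx
      cases hf : f x with
      | some v => simp
      | none => simp only [hf, ih]; by_cases hm : x ∈ L <;> simp [hm]
    · have hne : ¬ k0 = x := fun h' => hx h'.symm
      rw [h x hx, ih]
      simp [List.mem_cons, hne]

lemma findSome?_congr {β : Type} (L : List Int) (f g : Int → Option β)
    (h : ∀ x ∈ L, f x = g x) : L.findSome? f = L.findSome? g := by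
  induction L with
  | nil => rfl
  | cons x L ih =>
    rw [List.findSome?_cons, List.findSome?_cons, h x (by simp)]
    cases g x <;> simp [ih fun y hy => h y (by simp [hy])]

lemma inner_eq (a b K j : Int) (ha : 0 ≤ a) (hb : 1 ≤ b) (hj : 1 ≤ j) :
    ((PySem.List.pyRange 1 (K+1) 1).findSome? fun k =>
        if j * a + k * b = K then some [j, k] else none) =
      (if b ≤ K - a * j ∧ PySem.Int.mod (K - a * j) b = 0
       then some [j, PySem.Int.floordiv (K - a * j) b] else none) := by
  have hb0 : (0:Int) < b := by omega
  by_cases hdvd : b ∣ K - a * j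
  · have hk0b : (K - a * j) / b * b = K - a * j := Int.ediv_mul_cancel hdvd
    have huniq : ∀ k : Int, k ≠ (K - a * j) / b →
        (if j * a + k * b = K then some [j, k] else none) = none := by
      intro k hk
      rw [if_neg]
      intro hEq
      apply hk
      have h1 : k * b = (K - a * j) / b * b := by rw [hk0b]; linear_combination hEq
      exact mul_right_cancel₀ (by omega : b ≠ 0) h1
    rw [findSome?_unique _ ((K - a * j) / b) huniq]
    by_cases hbr : b ≤ K - a * j
    · have hr0 : (0:Int) ≤ K - a * j := by omega
      have hk1 : 1 ≤ (K - a * j) / b := by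
        rw [Int.le_ediv_iff_mul_le hb0]; omega
      have haj : (0:Int) ≤ a * j := mul_nonneg ha (by omega)
      have hkK : (K - a * j) / b ≤ K - a * j := Int.ediv_le_self b hr0
      have hmem : (K - a * j) / b ∈ PySem.List.pyRange 1 (K+1) 1 := by
        rw [PySem.List.mem_pyRange_one]
        exact ⟨hk1, by linarith⟩
      rw [if_pos hmem]
      rw [if_pos (show j * a + (K - a * j) / b * b = K by
        rw [hk0b]; ring)]
      have hmod : PySem.Int.mod (K - a * j) b = 0 := by
        rw [PySem.Int.mod_eq_emod_of_pos hb0]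
        exact Int.emod_eq_zero_of_dvd hdvd
      rw [if_pos ⟨hbr, hmod⟩, PySem.Int.floordiv_eq_ediv_of_pos hb0]
    · have hno : (K - a * j) / b ∉ PySem.List.pyRange 1 (K+1) 1 := by
        rw [PySem.List.mem_pyRange_one]
        rintro ⟨h1, _⟩
        apply hbr
        calc b = 1 * b := (one_mul b).symm
          _ ≤ (K - a * j) / b * b := mul_le_mul_of_nonneg_right h1 (by omega)
          _ = K - a * j := hk0b
      rw [if_neg hno, if_neg (by rintro ⟨h1, _⟩; exact hbr h1)]
  · have hall : ∀ k : Int, (if j * a + k * b = K then some [j, k] else none) = none := by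
      intro k
      rw [if_neg]
      intro hEq
      exact hdvd ⟨k, by linear_combination -hEq⟩
    rw [findSome?_unique _ 0 (fun k _ => hall k), hall 0]
    have hRHS : ¬ (b ≤ K - a * j ∧ PySem.Int.mod (K - a * j) b = 0) := by
      rintro ⟨_, hm⟩
      apply hdvd
      rw [PySem.Int.mod_eq_emod_of_pos hb0] at hm
      exact Int.dvd_of_emod_eq_zero hm
    rw [if_neg hRHS]
    split <;> rfl

-- ===== VERDICT (by name: the statement is the Claim_ definition above) =====
theorem solution_spec : Claim_equal_solution := by
  intro D K _
  unfold Spec_solution solution solution_alt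
  by_cases hK : K < 1
  · rw [if_pos hK, PySem.List.pyRange_one_eq_nil (by omega : (K:Int)+1 ≤ 1)]
    rfl
  · rw [if_neg hK]
    have hab := fib_pos ((PySem.List.pyRange 0 (D-2) 1)) 0 1 le_rfl le_rfl
    apply findSome?_congr
    intro j hj
    have hj1 : 1 ≤ j := (PySem.List.mem_pyRange_one.mp hj).1
    have hdp : ∀ k : Int,
        PySem.List.pyGetD ((PySem.List.pyRange 0 (D-2) 1).foldl dpStep [j,k]) (-1) 0 =
          j * ((PySem.List.pyRange 0 (D-2) 1).foldl fibStep (0,1)).1 +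
          k * ((PySem.List.pyRange 0 (D-2) 1).foldl fibStep (0,1)).2 := by
      intro k
      obtain ⟨pre', hpre⟩ := dp_fold (PySem.List.pyRange 0 (D-2) 1) [] j k
      rw [show ([j,k] : List Int) = [] ++ [j,k] from rfl, hpre]
      have hs : ∀ x y : Int, pre' ++ [x, y] = (pre' ++ [x]) ++ [y] := by intro x y; simp
      rw [hs, PySem.List.pyGetD_neg_one_append_singleton]
      exact fib_eval _ j k
    have hcongr : ((PySem.List.pyRange 1 (K+1) 1).findSome? fun k =>
        if PySem.List.pyGetD ((PySem.List.pyRange 0 (D-2) 1).foldl dpStep [j,k]) (-1) 0 = K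
        then some [j, k] else none) =
        ((PySem.List.pyRange 1 (K+1) 1).findSome? fun k =>
        if j * ((PySem.List.pyRange 0 (D-2) 1).foldl fibStep (0,1)).1 +
           k * ((PySem.List.pyRange 0 (D-2) 1).foldl fibStep (0,1)).2 = K
        then some [j, k] else none) := by
      apply findSome?_congr
      intro k _
      rw [hdp k]
    rw [hcongr]
    exact inner_eq _ _ K j hab.1 hab.2 hj1
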